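-- pv_equiv track=rewrite | github.com/wenting-zhao/hug | rag.py | process_answ
-- ===== SOURCE A (Python) =====
-- def process_answ(answ, ps_out, train, dataset):
--     start, end = 0, 0
--     outs = []
--     for curr in ps_out:
--         if train or dataset != "multirc":
--             end += len(curr)
--         else:
--             end += len(curr) * 2
--         out = answ[start:end]
--         outs.append(out)
--         start = end
--     return outs
-- ===== SOURCE B (Python) =====
-- def process_answ(answ, ps_out, train, dataset):
--     # consume answ from the front: take each chunk's worth, recurse on the remainder
--     mult = 2 if (not train and dataset == "multirc") else 1
--
--     def go(rest, chunks):
--         if not chunks: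
--             return []
--         k = len(chunks[0]) * mult
--         return [rest[:k]] + go(rest[k:], chunks[1:])
--
--     return go(answ, ps_out)
-- ===== Notes on version B (the rewrite author's own statement) =====
-- stated objective: alternative
-- what changed: Instead of threading cumulative start/end offsets into answ, B consumes answ itself: a recursion that takes the next chunk's worth off the front of the remaining list and recurses on the rest, so no absolute indices exist at all.
import Mathlib
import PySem

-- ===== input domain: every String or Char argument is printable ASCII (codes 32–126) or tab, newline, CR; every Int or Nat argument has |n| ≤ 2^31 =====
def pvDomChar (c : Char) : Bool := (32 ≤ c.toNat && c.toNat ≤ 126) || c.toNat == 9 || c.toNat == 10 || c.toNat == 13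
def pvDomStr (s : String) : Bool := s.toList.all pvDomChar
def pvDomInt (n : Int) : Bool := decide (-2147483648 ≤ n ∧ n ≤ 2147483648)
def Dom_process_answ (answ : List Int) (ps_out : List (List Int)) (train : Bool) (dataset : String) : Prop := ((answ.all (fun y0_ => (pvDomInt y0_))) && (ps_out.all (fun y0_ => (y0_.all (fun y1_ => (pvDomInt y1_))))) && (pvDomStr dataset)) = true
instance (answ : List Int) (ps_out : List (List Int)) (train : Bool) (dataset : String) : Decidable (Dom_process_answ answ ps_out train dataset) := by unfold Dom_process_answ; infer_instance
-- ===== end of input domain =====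

-- B replaces A's cumulative start/end offsets into answ by a recursion that consumes answ itself
-- (take the next chunk's worth off the front of the remainder); same return value, no speed claim.

-- ===== PORT A =====
-- literal port of A: one fold threading (start, end, outs) through ps_out
def process_answ (answ : List Int) (ps_out : List (List Int)) (train : Bool) (dataset : String) : List (List Int) :=
  (ps_out.foldl
    (fun (st : Int × Int × List (List Int)) curr =>
      let e := st.2.1 + (if train = true ∨ dataset ≠ "multirc" then (curr.length : Int) else (curr.length : Int) * 2)
      let out := PySem.List.slice answ (some st.1) (some e)
      (e, e, st.2.2 ++ [out]))
    (0, 0, [])).2.2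

-- ===== PORT B =====
-- port of B's inner recursion `go`: take the head chunk's worth from the front of `rest`, recurse on the drop
def pvGo (mult : Int) (rest : List Int) : List (List Int) → List (List Int)
  | [] => []
  | c :: r =>
      PySem.List.slice rest none (some ((c.length : Int) * mult)) ::
      pvGo mult (PySem.List.slice rest (some ((c.length : Int) * mult)) none) r

def process_answ_alt (answ : List Int) (ps_out : List (List Int)) (train : Bool) (dataset : String) : List (List Int) :=
  let mult : Int := if train = false ∧ dataset = "multirc" then 2 else 1
  pvGo mult answ ps_out

-- ===== PRECONDITION & SPEC =====
def Spec_process_answ (answ : List Int) (ps_out : List (List Int)) (train : Bool) (dataset : String) (out : List (List Int)) : Prop := out = process_answ_alt answ ps_out train dataset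
instance (answ : List Int) (ps_out : List (List Int)) (train : Bool) (dataset : String) (out : List (List Int)) : Decidable (Spec_process_answ answ ps_out train dataset out) := by unfold Spec_process_answ; infer_instance

-- ===== CLAIM =====
def Claim_equal_process_answ : Prop := ∀ (answ : List Int) (ps_out : List (List Int)) (train : Bool) (dataset : String), Dom_process_answ answ ps_out train dataset → Spec_process_answ answ ps_out train dataset (process_answ answ ps_out train dataset)

-- ===== LEMMAS AND PROOFS =====

/-- characterisation of A's result: the list of chunks of `answ` starting at offset `s`. -/
def pvChunks (answ : List Int) (m : Int) : Int → List (List Int) → List (List Int)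
  | _, [] => []
  | s, c :: r => PySem.List.slice answ (some s) (some (s + (c.length : Int) * m)) :: pvChunks answ m (s + (c.length : Int) * m) r

theorem pvA_fold (answ : List Int) (train : Bool) (dataset : String)
    (l : List (List Int)) (s : Int) (outs : List (List Int)) :
    (l.foldl
      (fun (st : Int × Int × List (List Int)) curr =>
        let e := st.2.1 + (if train = true ∨ dataset ≠ "multirc" then (curr.length : Int) else (curr.length : Int) * 2)
        let out := PySem.List.slice answ (some st.1) (some e)
        (e, e, st.2.2 ++ [out]))
      (s, s, outs)).2.2
      = outs ++ pvChunks answ (if train = true ∨ dataset ≠ "multirc" then 1 else 2) s l := by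
  induction l generalizing s outs with
  | nil => simp [pvChunks]
  | cons c r ih =>
    simp only [List.foldl_cons, pvChunks, ih, List.append_assoc, List.singleton_append]
    split_ifs with h <;> ring_nf

theorem pvChunks_eq_go (answ : List Int) (m : Int) (hm : 0 < m)
    (l : List (List Int)) (s : Int) (hs : 0 ≤ s) :
    pvChunks answ m s l = pvGo m (answ.drop s.toNat) l := by
  induction l generalizing s with
  | nil => simp [pvChunks, pvGo]
  | cons c r ih =>
    have hk : (0 : Int) ≤ (c.length : Int) * m := by positivity
    simp only [pvChunks, pvGo]
    congr 1
    · rw [PySem.List.slice_toNat _ hs (by omega),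
        PySem.List.slice_to _ hk]
      congr 1
      omega
    · rw [PySem.List.slice_from _ hk, List.drop_drop,
        ih (s + (c.length : Int) * m) (by omega)]
      congr 2
      omega

-- ===== VERDICT =====
theorem process_answ_spec : Claim_equal_process_answ := by
  intro answ ps_out train dataset _
  unfold Spec_process_answ process_answ process_answ_alt
  simp only [pvA_fold, List.nil_append]
  rw [pvChunks_eq_go answ _ (by split_ifs <;> omega) ps_out 0 le_rfl]
  simp only [Int.toNat_zero, List.drop_zero]
  congr 1
  by_cases ht : train = true <;> by_cases hd : dataset = "multirc" <;> simp [ht, hd]
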